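-- pv_equiv track=rewrite | github.com/ArenS2/LeetC0D3 | code/ID401.py | time_calc
-- ===== SOURCE A (Python) =====
-- def time_calc(t, n):
--     result = []
--     for i in range(t):
--         if(bin(i).count("1") == n):
--             if(t==60):
--                 result.append(str(i).zfill(2))
--             else:
--                 result.append(str(i))
--     return result
-- ===== SOURCE B (Python) =====
-- def time_calc(t, n):
--     # Generate, in ascending order, exactly the values v < t whose binary
--     # representation has n one-bits, by recursion on the bit width:
--     # gen(L, k, b) = sorted values v with v < min(2**L, b) and popcount(v) == k.
--     def gen(L, k, b):
--         if b <= 0 or k < 0 or k > L: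
--             return []
--         if L == 0:
--             return [0]
--         h = 1 << (L - 1)
--         return gen(L - 1, k, b) + [h + x for x in gen(L - 1, k - 1, b - h)]
--     L = t.bit_length() if t > 0 else 0
--     vals = gen(L, n, t)
--     if t == 60:
--         return [str(v).zfill(2) for v in vals]
--     return [str(v) for v in vals]
-- ===== Notes on version B (the rewrite author's own statement) =====
-- stated objective: faster
-- what changed: Instead of scanning every i in range(t) and popcount-testing it, B recursively generates (in ascending order, by splitting on the top bit and pruning branches above the bound t) exactly the values below t with n set bits, then formats them.
import Mathlib
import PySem

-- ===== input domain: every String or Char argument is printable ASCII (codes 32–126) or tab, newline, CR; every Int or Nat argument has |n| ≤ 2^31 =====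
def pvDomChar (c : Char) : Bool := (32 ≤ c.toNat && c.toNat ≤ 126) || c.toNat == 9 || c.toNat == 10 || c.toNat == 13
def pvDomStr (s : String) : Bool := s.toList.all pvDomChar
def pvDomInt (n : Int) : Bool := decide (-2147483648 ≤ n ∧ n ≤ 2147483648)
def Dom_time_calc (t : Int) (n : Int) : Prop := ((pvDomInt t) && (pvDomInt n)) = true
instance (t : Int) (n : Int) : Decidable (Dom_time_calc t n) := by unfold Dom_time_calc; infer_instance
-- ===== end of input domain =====

-- B replaces A's popcount test over every i in range(t) by a recursive generator
-- that emits, already in ascending order, exactly the values below t with n set bits.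

-- ===== PORT A =====
def time_calc (t : Int) (n : Int) : List String :=
  (PySem.List.pyRange 0 t 1).foldl
    (fun result i =>
      if ((PySem.Str.count (PySem.Int.pyBin i) "1" : Int) == n) then
        result ++ [if t == 60 then PySem.Str.zfill (PySem.Int.toStr i) 2
                   else PySem.Int.toStr i]
      else result)
    []

-- ===== PORT B =====
-- gen L k b = ascending values v with v < min(2^L, b) and popcount(v) = k
def genB : Nat → Int → Int → List Int
  | 0, k, b => if b ≤ 0 ∨ k < 0 ∨ k > ((0 : Nat) : Int) then [] else [0]
  | (L + 1), k, b =>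
    if b ≤ 0 ∨ k < 0 ∨ k > ((L : Int) + 1) then []
    else genB L k b ++ (genB L (k - 1) (b - 2 ^ L)).map (fun x => 2 ^ L + x)

def time_calc_alt (t : Int) (n : Int) : List String :=
  let L : Nat := if t > 0 then PySem.Int.bitLength t else 0
  let vals := genB L n t
  if t == 60 then vals.map (fun v => PySem.Str.zfill (PySem.Int.toStr v) 2)
  else vals.map PySem.Int.toStr

-- ===== PRECONDITION & SPEC =====
def Spec_time_calc (t : Int) (n : Int) (out : List String) : Prop := out = time_calc_alt t n
instance (t : Int) (n : Int) (out : List String) : Decidable (Spec_time_calc t n out) := by unfold Spec_time_calc; infer_instance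

-- ===== CLAIM (what is proved, stated in full; the proofs are below) =====
def Claim_equal_time_calc : Prop := ∀ (t : Int) (n : Int), Dom_time_calc t n → Spec_time_calc t n (time_calc t n)

-- ===== LEMMAS AND PROOFS =====

-- single-character PySem.Chars.count is List.count
theorem chars_count_go_single (c : Char) :
    ∀ (s : List Char) (fuel acc : Nat), s.length ≤ fuel →
      PySem.Chars.count.go [c] fuel s acc = acc + s.count c := by
  intro s
  induction s with
  | nil => intro fuel acc _; cases fuel <;> simp [PySem.Chars.count.go]
  | cons h t ih =>
    intro fuel acc hf
    cases fuel with
    | zero => simp at hf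
    | succ f =>
      have hstep : PySem.Chars.count.go [c] (f + 1) (h :: t) acc
          = if [c].isPrefixOf (h :: t) then PySem.Chars.count.go [c] f t (acc + 1)
            else PySem.Chars.count.go [c] f t acc := rfl
      rw [hstep]
      by_cases hc : h = c
      · subst hc
        rw [if_pos (by simp [List.isPrefixOf])]
        rw [ih f (acc + 1) (by simpa using hf)]
        simp [List.count_cons]
        try omega
      · rw [if_neg (by simp [List.isPrefixOf, beq_iff_eq]; exact fun h' => hc h'.symm)]
        rw [ih f acc (by simpa using hf)]
        simp [List.count_cons, hc]
        try (intro h'; exact absurd h'.symm hc)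

theorem chars_count_single (c : Char) (s : List Char) :
    PySem.Chars.count s [c] = s.count c := by
  simp only [PySem.Chars.count, List.isEmpty_cons]
  simpa using chars_count_go_single c s s.length 0 le_rfl

-- count of '1' among binary digits = bitCount
theorem toDigitsCore_count_one :
    ∀ (m : Nat) (fuel : Nat) (ds : List Char), m < fuel →
      (Nat.toDigitsCore 2 fuel m ds).count '1'
        = PySem.Int.bitCount (m : Int) + ds.count '1' := by
  intro m
  induction m using Nat.strong_induction_on with
  | _ m ih =>
    intro fuel ds hf
    cases fuel with
    | zero => omega
    | succ f =>
      simp only [Nat.toDigitsCore]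
      have hd : ((m % 2).digitChar :: ds).count '1' = m % 2 + ds.count '1' := by
        rcases Nat.mod_two_eq_zero_or_one m with h | h <;> rw [h] <;>
          simp [List.count_cons, show Nat.digitChar 0 = '0' from rfl,
                show Nat.digitChar 1 = '1' from rfl] <;> omega
      by_cases hz : m / 2 = 0
      · rw [if_pos hz, hd]
        have hm : m = 0 ∨ m = 1 := by omega
        rcases hm with h | h <;> subst h <;>
          norm_num [show PySem.Int.bitCount (1 : Int) = 1 from by decide,
                    show PySem.Int.bitCount (0 : Int) = 0 from by decide]
      · rw [if_neg hz]
        rw [ih (m / 2) (by omega) f ((m % 2).digitChar :: ds) (by omega)]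
        have hbc := PySem.Int.bitCount_natCast (m := m) (by omega)
        rw [hd, hbc]
        omega

theorem count_pyBin (i : Int) (hi : 0 ≤ i) :
    PySem.Str.count (PySem.Int.pyBin i) "1" = PySem.Int.bitCount i := by
  rw [PySem.Str.count_eq, PySem.Int.toList_pyBin]
  have hbin : PySem.Int.toBinChars0b i = '0' :: 'b' :: Nat.toDigits 2 i.toNat := by
    simp [PySem.Int.toBinChars0b, not_lt.mpr hi]
  rw [hbin]
  have h1 : ("1" : String).toList = ['1'] := rfl
  rw [h1, chars_count_single]
  simp only [List.count_cons]
  rw [Nat.toDigits, toDigitsCore_count_one i.toNat (i.toNat + 1) [] (by omega)]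
  simp [Int.toNat_of_nonneg hi]

-- popcount of 2^L + v for 0 ≤ v < 2^L
theorem bitCount_add_pow (L : Nat) :
    ∀ v : Int, 0 ≤ v → v < 2 ^ L →
      PySem.Int.bitCount (2 ^ L + v) = PySem.Int.bitCount v + 1 := by
  induction L with
  | zero =>
    intro v h0 h1
    have hv : v = 0 := by omega
    subst hv; decide
  | succ L ih =>
    intro v h0 h1
    have hpos : (0 : Int) < 2 ^ (L + 1) + v := by positivity
    rw [PySem.Int.bitCount_of_pos hpos]
    have hmod : PySem.Int.mod (2 ^ (L + 1) + v) 2 = PySem.Int.mod v 2 := by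
      simp only [PySem.Int.mod, pow_succ]
      rw [Int.fmod_eq_emod, Int.fmod_eq_emod]
      omega
    have hdiv : PySem.Int.floordiv (2 ^ (L + 1) + v) 2 = 2 ^ L + PySem.Int.floordiv v 2 := by
      simp only [PySem.Int.floordiv, pow_succ]
      rw [Int.fdiv_eq_ediv, Int.fdiv_eq_ediv]
      omega
    have hd0 : 0 ≤ PySem.Int.floordiv v 2 := by
      simp only [PySem.Int.floordiv]
      rw [Int.fdiv_eq_ediv]
      omega
    have hdlt : PySem.Int.floordiv v 2 < 2 ^ L := by
      simp only [PySem.Int.floordiv]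
      rw [Int.fdiv_eq_ediv]
      omega
    rw [hmod, hdiv, ih (PySem.Int.floordiv v 2) hd0 hdlt]
    by_cases hv : v = 0
    · subst hv
      simp [PySem.Int.floordiv, PySem.Int.mod,
            show PySem.Int.bitCount (0 : Int) = 0 from by decide]
    · have hvpos : (0 : Int) < v := lt_of_le_of_ne h0 (Ne.symm hv)
      rw [PySem.Int.bitCount_of_pos hvpos]
      ring

-- bitCount ≤ any L with v < 2^L
theorem bitCount_lt_pow_le (L : Nat) (v : Int) (h0 : 0 ≤ v) (h1 : v < 2 ^ L) :
    PySem.Int.bitCount v ≤ L := by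
  rcases eq_or_lt_of_le h0 with h | h
  · rw [← h]
    simp [show PySem.Int.bitCount (0 : Int) = 0 from by decide]
  · have hb := PySem.Int.bitCount_le_bitLength v
    have h2 := PySem.Int.two_pow_bitLength_le v (by omega)
    have habs : (v.natAbs : Int) = v := Int.natAbs_of_nonneg h0
    have hlt : v.natAbs < 2 ^ L := by
      have h3 : (v.natAbs : Int) < ((2 ^ L : Nat) : Int) := by
        rw [habs]; push_cast; exact h1
      exact_mod_cast h3
    have hpl : 2 ^ (PySem.Int.bitLength v - 1) < 2 ^ L := lt_of_le_of_lt h2 hlt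
    have hL : PySem.Int.bitLength v - 1 < L := (Nat.pow_lt_pow_iff_right (by norm_num)).mp hpl
    have hbl : 0 < PySem.Int.bitLength v := by
      by_contra hc
      push_neg at hc
      have h0' : PySem.Int.bitLength v = 0 := by omega
      have hlt2 := PySem.Int.lt_two_pow_bitLength v
      rw [h0'] at hlt2
      simp at hlt2
      omega
    omega

-- the characterisation of genB
theorem genB_eq (L : Nat) : ∀ (k b : Int),
    genB L k b = (PySem.List.pyRange 0 (min (2 ^ L) b) 1).filter
      (fun v => (PySem.Int.bitCount v : Int) == k) := by
  induction L with
  | zero =>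
    intro k b
    by_cases hb : b ≤ 0
    · rw [show genB 0 k b = [] from by simp [genB, hb]]
      rw [PySem.List.pyRange_one_eq_nil (by omega), List.filter_nil]
    · have hmin : min ((2:Int) ^ 0) b = 1 := by omega
      rw [hmin, show PySem.List.pyRange 0 1 1 = [0] from by decide]
      by_cases hk : k = 0
      · subst hk
        simp [genB, hb, show PySem.Int.bitCount (0 : Int) = 0 from by decide]
      · have hg : genB 0 k b = [] := by
          simp only [genB]
          rw [if_pos]
          right
          push_cast
          omega
        rw [hg]
        simp [show PySem.Int.bitCount (0 : Int) = 0 from by decide]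
        omega
  | succ L ih =>
    intro k b
    simp only [genB]
    by_cases hguard : b ≤ 0 ∨ k < 0 ∨ k > ((L : Int) + 1)
    · rw [if_pos hguard]
      symm
      rw [List.filter_eq_nil_iff]
      intro v hv
      rw [PySem.List.mem_pyRange_one] at hv
      simp only [beq_iff_eq]
      rcases hguard with hb | hk | hk
      · omega
      · have hcnn : 0 ≤ (PySem.Int.bitCount v : Int) := by positivity
        omega
      · have hvlt : v < 2 ^ (L + 1) := by omega
        have hble := bitCount_lt_pow_le (L + 1) v hv.1 hvlt
        push_cast at hk ⊢
        omega
    · rw [if_neg hguard]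
      push_neg at hguard
      obtain ⟨hb, hk0, hkL⟩ := hguard
      have h2L : (0:Int) < 2 ^ L := by positivity
      have hsplit : min ((2:Int) ^ L) b ≤ min ((2:Int) ^ (L+1)) b := by
        have hle : (2:Int) ^ L ≤ 2 ^ (L+1) := by rw [pow_succ]; omega
        omega
      rw [PySem.List.pyRange_one_append 0 (min ((2:Int) ^ L) b) (min ((2:Int) ^ (L+1)) b)
          (by omega) hsplit, List.filter_append, ih k b]
      congr 1
      by_cases hbl : b ≤ 2 ^ L
      · have h1 : min ((2:Int) ^ L) b = b := by omega
        have h2 : min ((2:Int) ^ (L+1)) b = b := by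
          have hle : (2:Int) ^ L ≤ 2 ^ (L+1) := by rw [pow_succ]; omega
          omega
        rw [h1, h2, PySem.List.pyRange_one_eq_nil (by omega), List.filter_nil]
        have hg : genB L (k - 1) (b - 2 ^ L) = [] := by
          cases L <;> simp only [genB] <;> rw [if_pos (Or.inl (by omega))]
        rw [hg]
        simp
      · push_neg at hbl
        have h1 : min ((2:Int) ^ L) b = 2 ^ L := by omega
        have h2 : min ((2:Int) ^ (L+1)) b = 2 ^ L + min ((2:Int) ^ L) (b - 2 ^ L) := by
          rw [pow_succ]; omega
        rw [h1, h2]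
        have hshift : PySem.List.pyRange (2 ^ L) (2 ^ L + min ((2:Int) ^ L) (b - 2 ^ L)) 1
            = (PySem.List.pyRange 0 (min ((2:Int) ^ L) (b - 2 ^ L)) 1).map
                (fun x => 2 ^ L + x) := by
          rw [PySem.List.pyRange_one, PySem.List.pyRange_one]
          simp [Function.comp, add_sub_cancel_left]
        rw [hshift, List.filter_map, ih (k - 1) (b - 2 ^ L)]
        congr 1
        apply List.filter_congr
        intro v hv
        rw [PySem.List.mem_pyRange_one] at hv
        simp only [Function.comp_apply, beq_iff_eq]
        have hvlt : v < 2 ^ L := by omega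
        rw [bitCount_add_pow L v hv.1 hvlt]
        have hcast : ((PySem.Int.bitCount v + 1 : Nat) : Int)
            = (PySem.Int.bitCount v : Int) + 1 := by push_cast; ring
        rw [hcast, Bool.eq_iff_iff]
        simp only [beq_iff_eq]
        omega

-- the characterisation of A
theorem time_calc_eq_filter (t n : Int) :
    time_calc t n = ((PySem.List.pyRange 0 t 1).filter
        (fun v => (PySem.Int.bitCount v : Int) == n)).map
      (fun i => if t == 60 then PySem.Str.zfill (PySem.Int.toStr i) 2
                else PySem.Int.toStr i) := by
  unfold time_calc
  rw [PySem.List.foldl_append_if]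
  rw [List.nil_append]
  congr 1
  apply List.filter_congr
  intro v hv
  rw [PySem.List.mem_pyRange_one] at hv
  rw [count_pyBin v hv.1]

-- ===== VERDICT (by name: the statement is the Claim_ definition above) =====
theorem time_calc_spec : Claim_equal_time_calc := by
  intro t n _
  unfold Spec_time_calc
  simp only [time_calc_alt]
  rw [time_calc_eq_filter]
  by_cases ht : t > 0
  · have hmin : min ((2:Int) ^ (if t > 0 then PySem.Int.bitLength t else 0)) t = t := by
      rw [if_pos ht]
      have h1 := PySem.Int.lt_two_pow_bitLength t
      have h2 : (t.natAbs : Int) = t := Int.natAbs_of_nonneg (by omega)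
      have h3 : ((t.natAbs : Nat) : Int) < ((2 ^ PySem.Int.bitLength t : Nat) : Int) := by
        exact_mod_cast h1
      have h4 : ((2 ^ PySem.Int.bitLength t : Nat) : Int) = (2:Int) ^ PySem.Int.bitLength t := by
        push_cast; ring
      rw [h2, h4] at h3
      omega
    rw [genB_eq, hmin]
    by_cases h60 : t = (60 : Int) <;> simp [h60, List.map_map]
  · have hnil : PySem.List.pyRange 0 t 1 = [] := PySem.List.pyRange_one_eq_nil (by omega)
    have hgen : genB (if t > 0 then PySem.Int.bitLength t else 0) n t = [] := by
      rw [if_neg ht]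
      simp only [genB]
      rw [if_pos (Or.inl (by omega))]
    rw [hnil, hgen]
    by_cases h60 : t = (60 : Int) <;> simp [h60]
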